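-- pv_equiv track=rewrite | github.com/Dukezo/PyPoa | pypoa.py | __get_cipher_blocks
-- ===== SOURCE A (Python) =====
-- def __get_cipher_blocks(ciphertext, block_size):
--     """
--     Converts the ciphertext to a multidimensional list containing all block bytes as decimals.
--
--     Args:
--         ciphertext (str): The ciphertext to convert.
--         block_size (int): The block size of the cipher.
--
--     Returns:
--         list: A multidimensional list containing all block bytes as decimals.
--
--     Raises:
--         InvalidBlockSizeError: If the block size does not match the text.
--     """
--
--     if len(ciphertext) % (block_size * 2) != 0:
--         raise InvalidBlockSizeError("Invalid block size for ciphertext specified.")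
--     blocks = []
--     for i in range(0, len(ciphertext), block_size * 2):
--         values = []
--         for z in range(i, i + block_size * 2 , 2):
--             values.append(int(ciphertext[z:z+2], 16))
--         blocks.append(values)
--     return blocks
--
-- class InvalidBlockSizeError(Exception):
--     pass
-- ===== SOURCE B (Python) =====
-- class InvalidBlockSizeError(Exception):
--     pass
--
--
-- def __get_cipher_blocks(ciphertext, block_size):
--     """Flatten-then-reshape: parse every 2-char window once into a flat list
--     of byte values, then partition it into consecutive block_size chunks."""
--     if len(ciphertext) % (block_size * 2) != 0:
--         raise InvalidBlockSizeError("Invalid block size for ciphertext specified.")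
--     flat = [int(ciphertext[i:i + 2], 16) for i in range(0, len(ciphertext), 2)]
--     return [flat[i:i + block_size] for i in range(0, len(flat), block_size)]
-- ===== Notes on version B (the rewrite author's own statement) =====
-- stated objective: alternative
-- what changed: Replaces A's nested per-block loops (outer over block offsets, inner appending each parsed pair) by a flatten-then-reshape decomposition: one comprehension parses every 2-char window into a flat list of byte values, a second comprehension slices that flat list into consecutive block_size chunks.
-- outside the precondition, e.g. on __get_cipher_blocks('zz', -1): A returns [], B raises ValueError
import Mathlib
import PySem

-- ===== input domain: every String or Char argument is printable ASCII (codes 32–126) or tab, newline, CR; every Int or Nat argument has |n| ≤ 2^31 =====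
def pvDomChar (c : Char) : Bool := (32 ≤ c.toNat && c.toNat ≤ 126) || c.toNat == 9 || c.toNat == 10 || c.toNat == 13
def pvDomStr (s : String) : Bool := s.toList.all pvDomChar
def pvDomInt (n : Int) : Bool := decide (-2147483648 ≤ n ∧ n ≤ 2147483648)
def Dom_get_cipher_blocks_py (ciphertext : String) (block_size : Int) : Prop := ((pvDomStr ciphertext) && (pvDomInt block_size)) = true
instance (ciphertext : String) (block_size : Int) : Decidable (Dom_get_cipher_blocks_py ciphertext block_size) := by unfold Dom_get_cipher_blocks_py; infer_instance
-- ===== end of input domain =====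

-- B replaces A's nested per-block parsing loops by one flat parsing pass over all
-- 2-char windows followed by a reshape into block_size chunks (objective: alternative
-- decomposition, same cost). Return-value equivalence proved on Pre_ below.

-- ===== PORT A =====
-- A's nested loops: outer over range(0, len, block_size*2) appending a block,
-- inner over range(i, i+block_size*2, 2) appending int(ciphertext[z:z+2], 16).
-- int(·, 16) is PySem.Int.ofCharsBase? · 16 (none = ValueError, excluded by Pre_; .getD 0 unreached there).
def get_cipher_blocks_py (ciphertext : String) (block_size : Int) : List (List Int) :=
  let cs := ciphertext.toList
  let L : Int := cs.length
  (PySem.List.pyRange 0 L (block_size * 2)).foldl (fun blocks i =>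
    blocks ++ [(PySem.List.pyRange i (i + block_size * 2) 2).foldl (fun values z =>
      values ++ [(PySem.Int.ofCharsBase? (PySem.List.slice cs (some z) (some (z + 2))) 16).getD 0]) []]) []

-- ===== PORT B =====
-- Source B: one comprehension parsing every 2-char window into `flat`, then one
-- comprehension slicing `flat` into consecutive block_size chunks.
def get_cipher_blocks_py_alt (ciphertext : String) (block_size : Int) : List (List Int) :=
  let cs := ciphertext.toList
  let flat : List Int := (PySem.List.pyRange 0 (cs.length : Int) 2).map (fun i =>
    (PySem.Int.ofCharsBase? (PySem.List.slice cs (some i) (some (i + 2))) 16).getD 0)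
  (PySem.List.pyRange 0 (flat.length : Int) block_size).map (fun i =>
    PySem.List.slice flat (some i) (some (i + block_size)))

-- ===== PRECONDITION & SPEC =====
-- Pre_ excludes: block_size = 0 (A raises ZeroDivisionError in the % guard); lengths with
-- len % (2*block_size) != 0 (A raises InvalidBlockSizeError); and texts with a 2-char window
-- that int(·, 16) rejects (A raises ValueError when block_size ≥ 1; for negative block_size
-- A returns [] without ever parsing, while B's flat parsing pass raises ValueError — cited).
def Pre_get_cipher_blocks_py (ciphertext : String) (block_size : Int) : Prop :=
  block_size ≠ 0 ∧
  (block_size * 2) ∣ (ciphertext.toList.length : Int) ∧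
  ∀ k ∈ List.range (ciphertext.toList.length / 2),
    (PySem.Int.ofCharsBase? ((ciphertext.toList.drop (2 * k)).take 2) 16).isSome = true
instance (ciphertext : String) (block_size : Int) : Decidable (Pre_get_cipher_blocks_py ciphertext block_size) := by unfold Pre_get_cipher_blocks_py; infer_instance
def pvWitness_get_cipher_blocks_py : String × Int := ("0aFF 7+b", 2)

def Spec_get_cipher_blocks_py (ciphertext : String) (block_size : Int) (out : List (List Int)) : Prop := out = get_cipher_blocks_py_alt ciphertext block_size
instance (ciphertext : String) (block_size : Int) (out : List (List Int)) : Decidable (Spec_get_cipher_blocks_py ciphertext block_size out) := by unfold Spec_get_cipher_blocks_py; infer_instance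

-- ===== CLAIM (what is proved, stated in full; the proofs are below) =====
def Claim_equal_get_cipher_blocks_py : Prop := ∀ (ciphertext : String) (block_size : Int), Dom_get_cipher_blocks_py ciphertext block_size → Pre_get_cipher_blocks_py ciphertext block_size → Spec_get_cipher_blocks_py ciphertext block_size (get_cipher_blocks_py ciphertext block_size)

-- ===== LEMMAS AND PROOFS =====

def pvParse (cs : List Char) (t : Nat) : Int :=
  (PySem.Int.ofCharsBase? ((cs.drop t).take 2) 16).getD 0

theorem A_inner (cs : List Char) (bn m : Nat) :
  (PySem.List.pyRange (m:Int) ((m:Int) + (bn:Int)*2) 2).foldl (fun values z =>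
      values ++ [(PySem.Int.ofCharsBase? (PySem.List.slice cs (some z) (some (z+2))) 16).getD 0]) []
  = (List.range bn).map (fun z => pvParse cs (m + 2*z)) := by
  rw [PySem.List.foldl_append_singleton_eq_map, PySem.List.pyRange_of_pos _ _ (by norm_num : (0:Int) < 2)]
  rcases Nat.eq_zero_or_pos bn with h0 | hpos
  · subst h0; simp
  have hcount : (if (m:Int) < (m:Int) + (bn:Int)*2 then (((m:Int) + (bn:Int)*2 - (m:Int) + 2 - 1)/2).toNat else 0) = bn := by
    rw [if_pos (by omega)]
    have h1 : ((m:Int) + (bn:Int)*2 - (m:Int) + 2 - 1) = ((2*bn+1 : Nat) : Int) := by push_cast; ring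
    rw [h1, show ((2:Int) = ((2:Nat):Int)) by norm_num, ← Int.natCast_div, Int.toNat_natCast]
    omega
  rw [hcount, List.map_map]
  apply List.map_congr_left
  intro k hk
  simp only [Function.comp]
  rw [PySem.List.slice_toNat _ (by positivity) (by positivity)]
  have t1 : ((m:Int) + 2*(k:Int)).toNat = m + 2*k := by omega
  have t2 : ((m:Int) + 2*(k:Int) + 2).toNat = m + 2*k + 2 := by omega
  have t3 : m + 2*k + 2 - (m + 2*k) = 2 := by omega
  simp only [t1, t2, t3]
  rfl

theorem B_flat (cs : List Char) (M : Nat) (hM : cs.length = 2*M) :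
  (PySem.List.pyRange 0 (cs.length : Int) 2).map (fun i =>
      (PySem.Int.ofCharsBase? (PySem.List.slice cs (some i) (some (i+2))) 16).getD 0)
  = (List.range M).map (fun k => pvParse cs (2*k)) := by
  rw [PySem.List.pyRange_of_pos _ _ (by norm_num : (0:Int) < 2)]
  have hcount : (if (0:Int) < (cs.length : Int) then (((cs.length : Int) - 0 + 2 - 1)/2).toNat else 0) = M := by
    rcases Nat.eq_zero_or_pos cs.length with h0 | hpos
    · rw [if_neg (by omega)]; omega
    rw [if_pos (by omega)]
    have h1 : ((cs.length : Int) - 0 + 2 - 1) = ((2*M+1 : Nat) : Int) := by push_cast; omega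
    rw [h1, show ((2:Int) = ((2:Nat):Int)) by norm_num, ← Int.natCast_div, Int.toNat_natCast]
    omega
  rw [hcount, List.map_map]
  apply List.map_congr_left
  intro k hk
  simp only [Function.comp]
  rw [PySem.List.slice_toNat _ (by positivity) (by positivity)]
  have t1 : ((0:Int) + 2*(k:Int)).toNat = 2*k := by omega
  have t2 : ((0:Int) + 2*(k:Int) + 2).toNat = 2*k + 2 := by omega
  have t3 : 2*k + 2 - 2*k = 2 := by omega
  simp only [t1, t2, t3]
  rfl

theorem main (cs : List Char) (bn K : Nat) (hb : 1 ≤ bn) (hK : cs.length = 2*bn*K) :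
  (PySem.List.pyRange 0 (cs.length : Int) ((bn:Int) * 2)).foldl (fun blocks i =>
    blocks ++ [(PySem.List.pyRange i (i + (bn:Int) * 2) 2).foldl (fun values z =>
      values ++ [(PySem.Int.ofCharsBase? (PySem.List.slice cs (some z) (some (z + 2))) 16).getD 0]) []]) []
  = (let flat : List Int := (PySem.List.pyRange 0 (cs.length : Int) 2).map (fun i =>
      (PySem.Int.ofCharsBase? (PySem.List.slice cs (some i) (some (i + 2))) 16).getD 0);
    (PySem.List.pyRange 0 (flat.length : Int) (bn:Int)).map (fun i =>
      PySem.List.slice flat (some i) (some (i + (bn:Int))))) := by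
  -- A side to canonical form
  rw [PySem.List.foldl_append_singleton_eq_map,
      PySem.List.pyRange_of_pos _ _ (by positivity : (0:Int) < (bn:Int)*2)]
  have hcountA : (if (0:Int) < (cs.length : Int) then (((cs.length : Int) - 0 + (bn:Int)*2 - 1)/((bn:Int)*2)).toNat else 0) = K := by
    rcases Nat.eq_zero_or_pos cs.length with h0 | hpos
    · rw [if_neg (by omega)]; nlinarith [hK, h0]
    rw [if_pos (by omega)]
    have h1 : ((cs.length : Int) - 0 + (bn:Int)*2 - 1) = ((2*bn*K + 2*bn - 1 : Nat) : Int) := by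
      omega
    have h2 : ((bn:Int)*2) = ((bn*2 : Nat) : Int) := by push_cast; ring
    rw [h1, h2, ← Int.natCast_div, Int.toNat_natCast]
    have : 2*bn*K + 2*bn - 1 = (bn*2)*K + (2*bn - 1) := by ring_nf; omega
    rw [this, Nat.mul_add_div (by omega), Nat.div_eq_of_lt (by omega)]
    omega
  rw [hcountA, List.map_map]
  -- B side
  simp only
  rw [B_flat cs (bn*K) (by rw [hK]; ring)]
  have hlen : ((List.range (bn*K)).map (fun k => pvParse cs (2*k))).length = bn*K := by simp
  rw [hlen, PySem.List.pyRange_of_pos _ _ (by positivity : (0:Int) < (bn:Int))]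
  have hcountB : (if (0:Int) < ((bn*K : Nat) : Int) then ((((bn*K : Nat) : Int) - 0 + (bn:Int) - 1)/((bn:Int))).toNat else 0) = K := by
    rcases Nat.eq_zero_or_pos K with h0 | hposK
    · rw [if_neg (by simp [h0])]; omega
    rw [if_pos (by exact_mod_cast Nat.mul_pos (by omega : 0 < bn) hposK)]
    have h1 : (((bn*K : Nat) : Int) - 0 + (bn:Int) - 1) = ((bn*K + bn - 1 : Nat) : Int) := by omega
    rw [h1, ← Int.natCast_div, Int.toNat_natCast]
    have : bn*K + bn - 1 = bn*K + (bn - 1) := by omega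
    rw [this, Nat.mul_add_div (by omega), Nat.div_eq_of_lt (by omega)]
    omega
  rw [hcountB, List.map_map]
  apply List.map_congr_left
  intro j hj
  have hjK : j < K := List.mem_range.mp hj
  simp only [Function.comp]
  -- LHS: inner block; RHS: slice of flat
  have eA : ((0:Int) + (bn:Int)*2*(j:Int)) = ((2*bn*j : Nat) : Int) := by push_cast; ring
  rw [eA, A_inner cs bn (2*bn*j)]
  rw [PySem.List.slice_toNat _ (by positivity) (by positivity)]
  have t1 : ((0:Int) + (bn:Int)*(j:Int)).toNat = bn*j := by
    have : ((0:Int) + (bn:Int)*(j:Int)) = ((bn*j : Nat) : Int) := by push_cast; ring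
    rw [this, Int.toNat_natCast]
  have t2 : ((0:Int) + (bn:Int)*(j:Int) + (bn:Int)).toNat = bn*j + bn := by
    have : ((0:Int) + (bn:Int)*(j:Int) + (bn:Int)) = ((bn*j + bn : Nat) : Int) := by push_cast; ring
    rw [this, Int.toNat_natCast]
  rw [t1, t2]
  have t3 : bn*j + bn - bn*j = bn := by omega
  rw [t3]
  -- now elementwise
  apply List.ext_getElem
  · simp only [List.length_map, List.length_range, List.length_take, List.length_drop]
    have h4 : bn*j + bn ≤ bn*K := by nlinarith
    omega
  intro z hz1 hz2
  simp only [List.getElem_map, List.getElem_range, List.getElem_take, List.getElem_drop]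
  exact congrArg (pvParse cs) (by ring)

theorem pyRange_neg_step_nil (L s : Int) (h : 0 ≤ L) (hs : s < 0) : PySem.List.pyRange 0 L s = [] := by
  have h1 : ¬ (s = 0) := by omega
  have h2 : ¬ (0 < s) := by omega
  have h3 : ¬ (L < 0) := by omega
  simp [PySem.List.pyRange, h1, h2, h3]

-- ===== VERDICT (by name: the statement is the Claim_ definition above) =====
theorem get_cipher_blocks_py_spec : Claim_equal_get_cipher_blocks_py := by
  intro ct b _ hpre
  obtain ⟨hb0, hdvd, _⟩ := hpre
  unfold Spec_get_cipher_blocks_py get_cipher_blocks_py get_cipher_blocks_py_alt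
  rcases lt_or_gt_of_ne hb0 with hneg | hpos
  · -- negative block_size: both ranges are empty, both sides are []
    have hA : PySem.List.pyRange 0 (ct.toList.length : Int) (b * 2) = [] :=
      pyRange_neg_step_nil _ _ (by positivity) (by omega)
    have hB : ∀ M : Nat, PySem.List.pyRange 0 (M : Int) b = [] := fun M =>
      pyRange_neg_step_nil _ _ (by positivity) hneg
    simp only [hA, List.foldl_nil, hB, List.map_nil]
  · obtain ⟨bn, rfl⟩ : ∃ m : Nat, b = (m : Int) := ⟨b.toNat, (Int.toNat_of_nonneg (by omega)).symm⟩
    have hbn : 1 ≤ bn := by exact_mod_cast hpos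
    have hdvd' : 2 * bn ∣ ct.toList.length := by
      have h := hdvd
      rw [show ((bn:Int)*2) = ((2*bn : Nat):Int) by push_cast; ring] at h
      exact_mod_cast h
    obtain ⟨K, hK⟩ := hdvd'
    exact main ct.toList bn K hbn hK
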